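-- pv_equiv track=rewrite | github.com/maikupero/fatpad | advent_of_code/adventofcode2021/day10/solution.py | incomplete_checker
-- ===== SOURCE A (Python) =====
-- def incomplete_checker(remaining_chars):
-- 	key = {
-- 		"(": 1,
-- 		"[": 2,
-- 		"{": 3,
-- 		"<": 4
-- 	}
-- 	score = 0
-- 	for char in range(len(remaining_chars)-1, -1, -1):
-- 		score *= 5
-- 		score += key[remaining_chars[char]]
--
-- 	return score
-- ===== SOURCE B (Python) =====
-- def incomplete_checker(remaining_chars):
-- 	key = {
-- 		"(": 1,
-- 		"[": 2,
-- 		"{": 3,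
-- 		"<": 4
-- 	}
-- 	if not remaining_chars:
-- 		return 0
-- 	return key[remaining_chars[0]] + 5 * incomplete_checker(remaining_chars[1:])
-- ===== Notes on version B (the rewrite author's own statement) =====
-- stated objective: alternative
-- what changed: Replaces A's reversed-index Horner loop with a mutable accumulator by a structural recursion on the list: head contributes key[head] and the recursive tail result is weighted by 5, no indices and no loop state.
import Mathlib
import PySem

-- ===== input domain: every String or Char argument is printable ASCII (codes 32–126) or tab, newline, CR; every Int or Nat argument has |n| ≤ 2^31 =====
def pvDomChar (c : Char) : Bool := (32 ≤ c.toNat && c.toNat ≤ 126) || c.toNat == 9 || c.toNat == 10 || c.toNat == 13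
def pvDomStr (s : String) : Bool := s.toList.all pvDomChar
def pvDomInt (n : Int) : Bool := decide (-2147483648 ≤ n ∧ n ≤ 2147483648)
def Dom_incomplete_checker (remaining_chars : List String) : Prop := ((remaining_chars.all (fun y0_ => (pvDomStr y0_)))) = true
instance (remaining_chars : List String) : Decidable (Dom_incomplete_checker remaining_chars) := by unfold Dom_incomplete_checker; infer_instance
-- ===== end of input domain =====

-- B replaces A's reversed-index Horner loop (mutable accumulator) by a structural
-- recursion on the list; objective: alternative decomposition, same cost.

-- ===== PORT A =====
-- the dict literal `key`; lookup key[c] (KeyError on other strings is excluded by Pre_, default 0 never reached inside Pre_)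
def pvKeyA (s : String) : Int :=
  (PySem.Dict.get? (PySem.Dict.ofList [("(", 1), ("[", 2), ("{", 3), ("<", 4)]) s).getD 0

def incomplete_checker (remaining_chars : List String) : Int :=
  -- for char in range(len(remaining_chars)-1, -1, -1): score *= 5; score += key[remaining_chars[char]]
  (PySem.List.pyRange ((remaining_chars.length : Int) - 1) (-1) (-1)).foldl
    (fun score char => score * 5 + pvKeyA (PySem.List.pyGetD remaining_chars char "")) 0

-- ===== PORT B =====
def pvKeyB (s : String) : Int :=
  (PySem.Dict.get? (PySem.Dict.ofList [("(", 1), ("[", 2), ("{", 3), ("<", 4)]) s).getD 0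

-- if not remaining_chars: return 0; return key[head] + 5 * incomplete_checker(tail)
def incomplete_checker_alt : List String → Int
  | [] => 0
  | c :: t => pvKeyB c + 5 * incomplete_checker_alt t

-- ===== PRECONDITION & SPEC =====
-- Pre_ excludes exactly the inputs on which the Python raises KeyError: a list element
-- that is not one of the four opening brackets.
def Pre_incomplete_checker (remaining_chars : List String) : Prop :=
  ∀ s ∈ remaining_chars, s = "(" ∨ s = "[" ∨ s = "{" ∨ s = "<"
instance (remaining_chars : List String) : Decidable (Pre_incomplete_checker remaining_chars) := by
  unfold Pre_incomplete_checker; infer_instance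

def pvWitness_incomplete_checker : List String := ["(", "<", "{"]

def Spec_incomplete_checker (remaining_chars : List String) (out : Int) : Prop := out = incomplete_checker_alt remaining_chars
instance (remaining_chars : List String) (out : Int) : Decidable (Spec_incomplete_checker remaining_chars out) := by unfold Spec_incomplete_checker; infer_instance

-- ===== CLAIM (what is proved, stated in full; the proofs are below) =====
def Claim_equal_incomplete_checker : Prop := ∀ (remaining_chars : List String), Dom_incomplete_checker remaining_chars → Pre_incomplete_checker remaining_chars → Spec_incomplete_checker remaining_chars (incomplete_checker remaining_chars)

-- ===== LEMMAS AND PROOFS =====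

-- A's Horner loop over a reversed value list computes B's structural recursion applied back
theorem pvHorner_eq_alt (vs : List String) :
    (vs.map pvKeyA).reverse.foldl (fun s v => s * 5 + v) 0 = incomplete_checker_alt vs := by
  induction vs with
  | nil => rfl
  | cons v t ih =>
    simp only [List.map_cons, List.reverse_cons, List.foldl_append, List.foldl_cons,
      List.foldl_nil, ih, incomplete_checker_alt]
    rw [show pvKeyA = pvKeyB from rfl]
    ring

theorem pvA_eq_alt (xs : List String) :
    incomplete_checker xs = incomplete_checker_alt xs := by
  unfold incomplete_checker
  have hr : PySem.List.pyRange ((xs.length : Int) - 1) (-1) (-1)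
      = (PySem.List.pyRange 0 (xs.length : Int) 1).reverse := by
    have := PySem.List.pyRange_neg_one_eq_reverse ((xs.length : Int) - 1) (-1)
    simpa using this
  rw [hr]
  rw [show (fun (score : Int) (char : Int) => score * 5 + pvKeyA (PySem.List.pyGetD xs char ""))
      = (fun (score : Int) (char : Int) =>
          (fun s v => s * 5 + v) score ((fun j => pvKeyA (PySem.List.pyGetD xs j "")) char)) from rfl]
  rw [← List.foldl_map]
  rw [List.map_reverse]
  rw [show (PySem.List.pyRange 0 (xs.length : Int) 1).map (fun j => pvKeyA (PySem.List.pyGetD xs j ""))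
      = ((PySem.List.pyRange 0 (xs.length : Int) 1).map (fun j => PySem.List.pyGetD xs j "")).map pvKeyA by
        simp [List.map_map]]
  rw [PySem.List.map_pyGetD_pyRange_zero' xs ""]
  exact pvHorner_eq_alt xs

-- ===== VERDICT (by name: the statement is the Claim_ definition above) =====
theorem incomplete_checker_spec : Claim_equal_incomplete_checker := by
  intro xs _ _
  unfold Spec_incomplete_checker
  exact pvA_eq_alt xs
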